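-- pv_equiv track=rewrite | github.com/simone-campagna/satisfy | src/satisfy/nonogram.py | pixmap_to_nonogram
-- ===== SOURCE A (Python) =====
-- def pixmap_shape(pixmap):
--     num_rows = len(pixmap)
--     if pixmap:
--         num_cols = max(len(row) for row in pixmap)
--     else:
--         num_cols = 0
--     return num_rows, num_cols
--
-- def pixmap_to_nonogram(pixmap):
--     num_rows, num_cols = pixmap_shape(pixmap)
--     rows = []
--     for r, pixmap_row in enumerate(pixmap):
--         row = []
--         count = 0
--         for c, cell in enumerate(pixmap_row):
--             if cell:
--                 count += 1
--             else:
--                 if count: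
--                     row.append(count)
--                 count = 0
--         if count:
--             row.append(count)
--         rows.append(row)
--     cols = []
--     for c in range(num_cols):
--         col = []
--         count = 0
--         for r in range(num_rows):
--             cell = pixmap[r][c]
--             if cell:
--                 count += 1
--             else:
--                 if count:
--                     col.append(count)
--                 count = 0
--         if count:
--             col.append(count)
--         cols.append(col)
--     return {'rows': rows, 'columns': cols}
-- ===== SOURCE B (Python) =====
-- def run_lengths(line):
--     runs = []
--     rest = list(line)
--     while rest:
--         if rest[0]:
--             run = 1
--             while run < len(rest) and rest[run]:
--                 run += 1
--             runs.append(run)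
--             rest = rest[run:]
--         else:
--             rest = rest[1:]
--     return runs
--
-- def pixmap_to_nonogram(pixmap):
--     return {'rows': [run_lengths(row) for row in pixmap],
--             'columns': [run_lengths(col) for col in zip(*pixmap)]}
-- ===== Notes on version B (the rewrite author's own statement) =====
-- stated objective: idiomatic
-- what changed: B factors a single run_lengths helper that scans each run with an advancing index and slices it off (instead of A's cell-by-cell counter accumulator with flush), applies it to rows by comprehension and to columns via zip(*pixmap) transposition, eliminating A's shape computation and doubly-indexed column loops; Pre_ excludes ragged pixmaps, on which A raises IndexError.
import Mathlib
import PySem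

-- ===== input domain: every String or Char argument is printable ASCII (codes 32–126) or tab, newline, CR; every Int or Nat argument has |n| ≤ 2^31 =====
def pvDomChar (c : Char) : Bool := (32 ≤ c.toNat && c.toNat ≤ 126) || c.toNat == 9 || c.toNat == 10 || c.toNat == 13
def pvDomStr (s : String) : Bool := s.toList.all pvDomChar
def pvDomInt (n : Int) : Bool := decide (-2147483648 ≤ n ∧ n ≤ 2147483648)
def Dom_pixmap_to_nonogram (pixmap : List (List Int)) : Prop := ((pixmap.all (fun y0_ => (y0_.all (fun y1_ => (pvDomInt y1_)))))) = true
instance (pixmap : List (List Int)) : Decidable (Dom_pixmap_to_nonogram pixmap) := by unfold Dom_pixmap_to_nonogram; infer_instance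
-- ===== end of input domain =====

-- B restructures A: a shared run_lengths helper (advance-over-a-run scan) mapped over the rows
-- and over the zip(*pixmap) transpose, instead of A's counter-accumulator loops with indexed columns.
-- Equivalence is proved on rectangular pixmaps (Pre_); on ragged ones A raises IndexError.

-- ===== PORT A =====
-- one accumulator step of A's inner loops ('if cell: count += 1 else: flush')
def pvStepA (st : List Int × Int) (cell : Int) : List Int × Int :=
  if cell ≠ 0 then (st.1, st.2 + 1)
  else ((if st.2 ≠ 0 then st.1 ++ [st.2] else st.1), 0)

-- the trailing 'if count: row.append(count)'
def pvFlushA (st : List Int × Int) : List Int :=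
  if st.2 ≠ 0 then st.1 ++ [st.2] else st.1

def pixmap_to_nonogram (pixmap : List (List Int)) : List (String × List (List Int)) :=
  let num_rows := pixmap.length
  let num_cols : Nat := if pixmap ≠ [] then (pixmap.map List.length).foldl max 0 else 0
  let rows := pixmap.map (fun pixmap_row => pvFlushA (pixmap_row.foldl pvStepA ([], 0)))
  -- column loop: 'for r in range(num_rows): cell = pixmap[r][c]'; the getD defaults are never
  -- reached inside Pre_ (r < num_rows and, rectangular, c < len(pixmap[r])); outside Pre_ Python raises
  let cols := (List.range num_cols).map (fun c =>
    pvFlushA ((PySem.List.pyRange 0 (num_rows : Int) 1).foldl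
      (fun st r => pvStepA st ((PySem.List.pyGetD pixmap r []).getD c 0)) ([], 0)))
  [("rows", rows), ("columns", cols)]

-- ===== PORT B =====
-- Source B run_lengths: advance an index over the current run, emit its length, slice it off
def pvRunsB : List Int → List Int
  | [] => []
  | x :: xs =>
    if x ≠ 0 then
      ((1 : Int) + (xs.takeWhile (· ≠ 0)).length) :: pvRunsB (xs.dropWhile (· ≠ 0))
    else
      pvRunsB xs
termination_by l => l.length
decreasing_by
  · exact Nat.lt_succ_of_le (List.length_dropWhile_le _ _)
  · simp

-- zip(*pixmap): tuples while every row still has an element (Python zip truncates at the shortest row)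
def pvZipStar : List (List Int) → List (List Int)
  | [] => []
  | r0 :: rest =>
    if h : ((r0 :: rest).any (·.isEmpty)) then []
    else ((r0 :: rest).map (fun r => r.headD 0)) :: pvZipStar ((r0 :: rest).map List.tail)
termination_by rows => (rows.headD []).length
decreasing_by
  simp only [List.any_cons, Bool.or_eq_true, List.isEmpty_iff, not_or] at h
  simp only [List.map_cons, List.headD_cons]
  cases r0 with
  | nil => exact absurd rfl h.1
  | cons a t => simp

def pixmap_to_nonogram_alt (pixmap : List (List Int)) : List (String × List (List Int)) :=
  [("rows", pixmap.map pvRunsB), ("columns", (pvZipStar pixmap).map pvRunsB)]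

-- ===== PRECONDITION & SPEC =====
-- Pre_ excludes exactly the ragged pixmaps (rows of unequal length): there A's column loop
-- raises IndexError (pixmap[r][c] with c beyond a short row), so A returns no value.
def Pre_pixmap_to_nonogram (pixmap : List (List Int)) : Prop :=
  ∀ row ∈ pixmap, row.length = (pixmap.headD []).length

instance (pixmap : List (List Int)) : Decidable (Pre_pixmap_to_nonogram pixmap) := by
  unfold Pre_pixmap_to_nonogram; infer_instance

def pvWitness_pixmap_to_nonogram : List (List Int) := [[1, 0, 1], [0, 1, 1]]

def Spec_pixmap_to_nonogram (pixmap : List (List Int)) (out : List (String × List (List Int))) : Prop := out = pixmap_to_nonogram_alt pixmap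
instance (pixmap : List (List Int)) (out : List (String × List (List Int))) : Decidable (Spec_pixmap_to_nonogram pixmap out) := by unfold Spec_pixmap_to_nonogram; infer_instance

-- ===== CLAIM (what is proved, stated in full; the proofs are below) =====
def Claim_equal_pixmap_to_nonogram : Prop := ∀ (pixmap : List (List Int)), Dom_pixmap_to_nonogram pixmap → Pre_pixmap_to_nonogram pixmap → Spec_pixmap_to_nonogram pixmap (pixmap_to_nonogram pixmap)

-- ===== LEMMAS AND PROOFS =====

-- A's accumulator loop in terms of B's run scan: a pending count c folds into the first run.
theorem pvStepA_runs (line : List Int) : ∀ (acc : List Int) (c : Int), 0 ≤ c →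
    pvFlushA (line.foldl pvStepA (acc, c)) =
      acc ++ (if c = 0 then pvRunsB line
              else (c + (line.takeWhile (· ≠ 0)).length) :: pvRunsB (line.dropWhile (· ≠ 0))) := by
  induction line with
  | nil =>
    intro acc c hc
    by_cases h : c = 0 <;> simp [pvFlushA, pvRunsB, h]
  | cons x xs ih =>
    intro acc c hc
    by_cases hx : x = 0
    · -- step flushes
      by_cases h : c = 0
      · simp [pvStepA, hx, h, List.foldl_cons, pvRunsB, ih acc 0 le_rfl]
      · have := ih (acc ++ [c]) 0 le_rfl
        simp [pvStepA, hx, h, List.foldl_cons, this, pvRunsB]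
    · -- step increments
      have h1 : (0:Int) ≤ c + 1 := by omega
      have h2 : c + 1 ≠ 0 := by omega
      have hrec := ih acc (c + 1) h1
      simp only [List.foldl_cons, pvStepA, hx, ne_eq, not_false_iff, if_true]
      rw [hrec, if_neg h2]
      by_cases h : c = 0
      · subst h
        simp [pvRunsB, hx]
      · rw [if_neg h]
        simp [hx]
        omega

theorem pvRowClue_eq (line : List Int) :
    pvFlushA (line.foldl pvStepA ([], 0)) = pvRunsB line := by
  simpa using pvStepA_runs line [] 0 le_rfl

-- row.getD (c+1) = row.tail.getD c, unconditionally
theorem getD_succ_tail (row : List Int) (c : Nat) :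
    row.getD (c + 1) 0 = row.tail.getD c 0 := by
  cases row <;> simp

-- the transpose of a rectangular nonempty pixmap, column by column
theorem pvZipStar_rect (L : Nat) : ∀ (pm : List (List Int)), pm ≠ [] →
    (∀ row ∈ pm, row.length = L) →
    pvZipStar pm = (List.range L).map (fun c => pm.map (fun row => row.getD c 0)) := by
  induction L with
  | zero =>
    intro pm hne hlen
    cases pm with
    | nil => simp at hne
    | cons r0 rest =>
      have h0 : r0.length = 0 := hlen r0 (by simp)
      rw [pvZipStar]
      simp [List.length_eq_zero_iff.mp h0]
  | succ L ih =>
    intro pm hne hlen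
    cases pm with
    | nil => simp at hne
    | cons r0 rest =>
      have hall : ¬ ((r0 :: rest).any (·.isEmpty)) = true := by
        simp only [List.any_eq_true, List.isEmpty_iff]
        rintro ⟨r, hr, he⟩
        have := hlen r hr
        rw [he] at this; simp at this
      rw [pvZipStar, dif_neg hall]
      have htl : ∀ row ∈ (r0 :: rest).map List.tail, row.length = L := by
        intro row hrow
        rcases List.mem_map.mp hrow with ⟨r, hr, rfl⟩
        have := hlen r hr
        simp [this]
      rw [ih ((r0 :: rest).map List.tail) (by simp) htl, List.range_succ_eq_map]
      have hhd : ∀ r : List Int, r.getD 0 0 = r.headD 0 := fun r => by cases r <;> simp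
      simp only [List.map_cons, List.map_map, hhd]
      refine congrArg _ ?_
      refine List.map_congr_left (fun c _ => ?_)
      simp only [Function.comp_apply, Function.comp_def, Nat.succ_eq_add_one,
        getD_succ_tail]

-- fold of all-equal lengths: the max is that length
theorem foldl_max_const (L : Nat) : ∀ (l : List Nat) (a : Nat), (∀ x ∈ l, x = L) →
    l.foldl max a = if l = [] then a else max a L := by
  intro l
  induction l with
  | nil => simp
  | cons x t ih =>
    intro a hx
    have hxL : x = L := hx x (by simp)
    have := ih (max a x) (fun y hy => hx y (by simp [hy]))
    rw [List.foldl_cons, this]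
    by_cases ht : t = [] <;> simp [ht, hxL]

-- ===== VERDICT (by name: the statement is the Claim_ definition above) =====
theorem pixmap_to_nonogram_spec : Claim_equal_pixmap_to_nonogram := by
  intro pixmap _ hpre
  unfold Spec_pixmap_to_nonogram pixmap_to_nonogram pixmap_to_nonogram_alt
  cases pixmap with
  | nil => simp [pvZipStar]
  | cons r0 rest =>
    set pm := r0 :: rest with hpm
    have hne : pm ≠ [] := by simp [hpm]
    set L := r0.length with hL
    have hlen : ∀ row ∈ pm, row.length = L := by
      intro row hrow
      simpa [hpm] using hpre row hrow
    -- rows agree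
    have hrows : pm.map (fun row => pvFlushA (row.foldl pvStepA ([], 0))) = pm.map pvRunsB :=
      List.map_congr_left (fun row _ => pvRowClue_eq row)
    -- num_cols = L
    have hmax : (pm.map List.length).foldl max 0 = L := by
      have hall : ∀ x ∈ pm.map List.length, x = L := by
        intro x hx
        rcases List.mem_map.mp hx with ⟨r, hr, rfl⟩
        exact hlen r hr
      rw [foldl_max_const L _ 0 hall]
      simp [hpm]
    -- columns agree
    have hcols : ∀ c : Nat,
        pvFlushA ((PySem.List.pyRange 0 (pm.length : Int) 1).foldl
          (fun st r => pvStepA st ((PySem.List.pyGetD pm r []).getD c 0)) ([], 0)) =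
        pvRunsB (pm.map (fun row => row.getD c 0)) := by
      intro c
      rw [PySem.List.foldl_pyRange_zero_pyGetD' pm []
        (fun st row => pvStepA st (row.getD c 0)) ([], 0)]
      have h := pvRowClue_eq (pm.map (fun row => row.getD c 0))
      rw [List.foldl_map] at h
      exact h
    dsimp only
    rw [if_pos hne, hmax, hrows, pvZipStar_rect L pm hne hlen, List.map_map]
    simp only [List.cons.injEq, Prod.mk.injEq, true_and, and_true]
    exact List.map_congr_left (fun c _ => hcols c)
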